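-- pv_equiv track=rewrite | github.com/grasshopperTrainer/coding_practice | baekjoon/accepted/1365 꼬인 전깃줄.py | solution
-- ===== SOURCE A (Python) =====
-- import bisect
--
-- def solution(N, nums):
--     array = []
--     for num in nums:
--         i = bisect.bisect_right(array, num)
--         if len(array) == i:
--             array.append(num)
--         else:
--             array[i] = num
--     return len(nums) - len(array)
-- ===== SOURCE B (Python) =====
-- def solution(N, nums):
--     # classic quadratic DP: pairs holds (value, length of longest
--     # non-decreasing subsequence ending at that value)
--     pairs = []
--     for x in nums:
--         best = 0
--         for v, d in pairs:
--             if v <= x and d > best: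
--                 best = d
--         pairs.append((x, best + 1))
--     best_all = 0
--     for v, d in pairs:
--         if d > best_all:
--             best_all = d
--     return len(nums) - best_all
-- ===== Notes on version B (the rewrite author's own statement) =====
-- stated objective: alternative
-- what changed: Replaces the bisect-based patience 'tails' array with the classic quadratic DP that stores, for each element, the length of the longest non-decreasing subsequence ending there, and subtracts the maximum from len(nums).
import Mathlib
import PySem

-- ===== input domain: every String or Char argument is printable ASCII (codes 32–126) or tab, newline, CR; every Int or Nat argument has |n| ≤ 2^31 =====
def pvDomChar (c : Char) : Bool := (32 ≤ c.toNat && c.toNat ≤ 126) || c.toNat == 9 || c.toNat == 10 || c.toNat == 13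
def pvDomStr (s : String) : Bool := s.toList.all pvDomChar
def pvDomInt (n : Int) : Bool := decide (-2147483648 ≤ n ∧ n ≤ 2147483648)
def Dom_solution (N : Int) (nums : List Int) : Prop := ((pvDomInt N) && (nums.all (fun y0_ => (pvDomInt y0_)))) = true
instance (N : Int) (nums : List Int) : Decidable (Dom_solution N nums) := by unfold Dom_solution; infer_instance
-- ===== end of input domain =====

-- B replaces A's bisect-based patience 'tails' array with the classic quadratic
-- DP over (value, LIS-length-ending-here) pairs; alternative algorithm, not faster.

-- ===== PORT A =====
-- bisect.bisect_right ported as the number of elements ≤ x: exact on sorted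
-- lists, and `array` is kept sorted (non-decreasing) by A's loop.
def bisectRight (l : List Int) (x : Int) : Nat := l.countP (fun a => decide (a ≤ x))

def solStep (array : List Int) (num : Int) : List Int :=
  let i := bisectRight array num
  if array.length = i then array ++ [num] else array.set i num

def solution (N : Int) (nums : List Int) : Int :=
  (nums.length : Int) - ((nums.foldl solStep []).length : Int)

-- ===== PORT B =====
def bestBelow (pairs : List (Int × Int)) (x : Int) : Int :=
  pairs.foldl (fun best vd => if vd.1 ≤ x ∧ vd.2 > best then vd.2 else best) 0

def altStep (pairs : List (Int × Int)) (x : Int) : List (Int × Int) :=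
  pairs ++ [(x, bestBelow pairs x + 1)]

def bestAll (pairs : List (Int × Int)) : Int :=
  pairs.foldl (fun best vd => if vd.2 > best then vd.2 else best) 0

def solution_alt (N : Int) (nums : List Int) : Int :=
  (nums.length : Int) - bestAll (nums.foldl altStep [])

-- ===== PRECONDITION & SPEC =====
def Spec_solution (N : Int) (nums : List Int) (out : Int) : Prop := out = solution_alt N nums
instance (N : Int) (nums : List Int) (out : Int) : Decidable (Spec_solution N nums out) := by unfold Spec_solution; infer_instance

-- ===== CLAIM (what is proved, stated in full; the proofs are below) =====
def Claim_equal_solution : Prop := ∀ (N : Int) (nums : List Int), Dom_solution N nums → Spec_solution N nums (solution N nums)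

-- ===== LEMMAS AND PROOFS =====

-- t is non-decreasing, read through getD
def SortedLe (t : List Int) : Prop :=
  ∀ j k : Nat, j ≤ k → k < t.length → t.getD j 0 ≤ t.getD k 0

-- the invariant tying A's tails array t to B's (value, dp) pairs ps:
-- dp values lie in [1, |t|], t.getD k 0 is the least value ending a
-- subsequence of length k+1, and it is attained.
def LisInv (t : List Int) (ps : List (Int × Int)) : Prop :=
  SortedLe t ∧
  (∀ p ∈ ps, 1 ≤ p.2 ∧ p.2 ≤ (t.length : Int)) ∧
  (∀ k : Nat, k < t.length → ∃ p ∈ ps, p.2 = (k : Int) + 1 ∧ p.1 = t.getD k 0) ∧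
  (∀ p ∈ ps, ∀ k : Nat, k < t.length → (k : Int) + 1 ≤ p.2 → t.getD k 0 ≤ p.1)

lemma bestBelow_go_spec (x : Int) (ps : List (Int × Int)) (b : Int) :
    b ≤ ps.foldl (fun best vd => if vd.1 ≤ x ∧ vd.2 > best then vd.2 else best) b ∧
    (∀ p ∈ ps, p.1 ≤ x →
      p.2 ≤ ps.foldl (fun best vd => if vd.1 ≤ x ∧ vd.2 > best then vd.2 else best) b) ∧
    (ps.foldl (fun best vd => if vd.1 ≤ x ∧ vd.2 > best then vd.2 else best) b = b ∨
      ∃ p ∈ ps, p.1 ≤ x ∧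
        p.2 = ps.foldl (fun best vd => if vd.1 ≤ x ∧ vd.2 > best then vd.2 else best) b) := by
  induction ps generalizing b with
  | nil => simp
  | cons a ps ih =>
    simp only [List.foldl_cons]
    by_cases h : a.1 ≤ x ∧ a.2 > b
    · rw [if_pos h]
      obtain ⟨h1, h2, h3⟩ := ih a.2
      refine ⟨by omega, ?_, ?_⟩
      · intro p hp hpx
        rcases List.mem_cons.mp hp with he | hp'
        · rw [he]; exact h1
        · exact h2 p hp' hpx
      · rcases h3 with h3 | ⟨p, hp, hpx, hpe⟩
        · exact Or.inr ⟨a, List.mem_cons_self, h.1, h3.symm⟩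
        · exact Or.inr ⟨p, List.mem_cons_of_mem _ hp, hpx, hpe⟩
    · rw [if_neg h]
      obtain ⟨h1, h2, h3⟩ := ih b
      refine ⟨h1, ?_, ?_⟩
      · intro p hp hpx
        rcases List.mem_cons.mp hp with he | hp'
        · rw [he]
          have : a.2 ≤ b := by
            rcases not_and_or.mp h with h' | h'
            · rw [he] at hpx; exact absurd hpx h'
            · omega
          omega
        · exact h2 p hp' hpx
      · rcases h3 with h3 | ⟨p, hp, hpx, hpe⟩
        · exact Or.inl h3
        · exact Or.inr ⟨p, List.mem_cons_of_mem _ hp, hpx, hpe⟩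

lemma bestAll_go_spec (ps : List (Int × Int)) (b : Int) :
    b ≤ ps.foldl (fun best vd => if vd.2 > best then vd.2 else best) b ∧
    (∀ p ∈ ps, p.2 ≤ ps.foldl (fun best vd => if vd.2 > best then vd.2 else best) b) ∧
    (ps.foldl (fun best vd => if vd.2 > best then vd.2 else best) b = b ∨
      ∃ p ∈ ps, p.2 = ps.foldl (fun best vd => if vd.2 > best then vd.2 else best) b) := by
  induction ps generalizing b with
  | nil => simp
  | cons a ps ih =>
    simp only [List.foldl_cons]
    by_cases h : a.2 > b
    · rw [if_pos h]
      obtain ⟨h1, h2, h3⟩ := ih a.2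
      refine ⟨by omega, ?_, ?_⟩
      · intro p hp
        rcases List.mem_cons.mp hp with he | hp'
        · rw [he]; exact h1
        · exact h2 p hp'
      · rcases h3 with h3 | ⟨p, hp, hpe⟩
        · exact Or.inr ⟨a, List.mem_cons_self, h3.symm⟩
        · exact Or.inr ⟨p, List.mem_cons_of_mem _ hp, hpe⟩
    · rw [if_neg h]
      obtain ⟨h1, h2, h3⟩ := ih b
      refine ⟨h1, ?_, ?_⟩
      · intro p hp
        rcases List.mem_cons.mp hp with he | hp'
        · rw [he]; omega
        · exact h2 p hp'
      · rcases h3 with h3 | ⟨p, hp, hpe⟩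
        · exact Or.inl h3
        · exact Or.inr ⟨p, List.mem_cons_of_mem _ hp, hpe⟩

lemma sortedLe_tail (a : Int) (t : List Int) (h : SortedLe (a :: t)) : SortedLe t := by
  intro j k hjk hk
  have := h (j+1) (k+1) (by omega) (by simpa using Nat.succ_lt_succ hk)
  simpa using this

-- on a sorted list, the elements ≤ x are exactly the first countP of them
lemma countP_sorted_iff (t : List Int) (x : Int) (hs : SortedLe t) :
    ∀ k : Nat, k < t.length → (t.getD k 0 ≤ x ↔ k < t.countP (fun a => decide (a ≤ x))) := by
  induction t with
  | nil => intro k hk; simp at hk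
  | cons a t ih =>
    intro k hk
    have hst := sortedLe_tail a t hs
    by_cases ha : a ≤ x
    · rw [List.countP_cons]
      simp only [ha, decide_true, if_true]
      cases k with
      | zero => simpa [ha] using Nat.succ_pos _
      | succ k =>
        have hk' : k < t.length := by simpa using hk
        have hiff := ih hst k hk'
        simp only [List.getD_cons_succ]
        omega
    · rw [List.countP_cons]
      simp only [ha, decide_false, Bool.false_eq_true, if_false]
      have hcz : t.countP (fun a => decide (a ≤ x)) = 0 := by
        by_contra h
        have hpos : 0 < t.countP (fun a => decide (a ≤ x)) := Nat.pos_of_ne_zero h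
        have hlen : 0 < t.length := lt_of_lt_of_le hpos List.countP_le_length
        have h0 : t.getD 0 0 ≤ x := (ih hst 0 hlen).mpr hpos
        have : a ≤ t.getD 0 0 := by
          have := hs 0 1 (by omega) (by simpa using Nat.succ_lt_succ hlen)
          simpa using this
        omega
      simp only [hcz, Nat.add_zero]
      constructor
      · intro h
        exfalso
        have : a ≤ (a :: t).getD k 0 := hs 0 k (Nat.zero_le _) hk
        omega
      · omega

lemma bisectRight_le_length (t : List Int) (x : Int) : bisectRight t x ≤ t.length :=
  List.countP_le_length

-- the DP transition value equals A's bisect index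
lemma best_eq (t : List Int) (ps : List (Int × Int)) (x : Int) (h : LisInv t ps) :
    bestBelow ps x = ((bisectRight t x : Nat) : Int) := by
  obtain ⟨hs, hB1, hB2, hB3⟩ := h
  obtain ⟨h0, hub, hex⟩ := bestBelow_go_spec x ps 0
  set i := bisectRight t x with hi
  have hic : i = t.countP (fun a => decide (a ≤ x)) := hi
  have hil : i ≤ t.length := bisectRight_le_length t x
  have hiff := countP_sorted_iff t x hs
  apply le_antisymm
  · -- bestBelow ≤ i
    rcases hex with he | ⟨p, hp, hpx, hpe⟩
    · rw [bestBelow, he]; positivity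
    · by_contra hlt
      push_neg at hlt
      have hd : ((i : Nat) : Int) + 1 ≤ p.2 := by rw [bestBelow] at hlt; omega
      have hdt : p.2 ≤ (t.length : Int) := (hB1 p hp).2
      have hilen : i < t.length := by
        by_contra h'
        have : i = t.length := by omega
        omega
      have := hB3 p hp i hilen hd
      have hx : t.getD i 0 ≤ x := le_trans this hpx
      have := (hiff i hilen).mp hx
      omega
  · -- i ≤ bestBelow
    rcases Nat.eq_zero_or_pos i with h0' | hpos
    · rw [h0', bestBelow]; exact_mod_cast h0
    · have hi1 : i - 1 < t.length := by omega
      have hx : t.getD (i-1) 0 ≤ x := (hiff (i-1) hi1).mpr (by omega)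
      obtain ⟨p, hp, hpd, hpv⟩ := hB2 (i-1) hi1
      have := hub p hp (by rw [hpv]; exact hx)
      rw [bestBelow]
      have : (((i:Nat) - 1 : Nat) : Int) + 1 = (i : Int) := by
        have : (1:Nat) ≤ i := hpos
        omega
      omega

lemma getD_append_lt (t : List Int) (y : Int) (k : Nat) (hk : k < t.length) :
    (t ++ [y]).getD k 0 = t.getD k 0 := by
  simp [List.getD, List.getElem?_append_left hk]

lemma getD_append_self (t : List Int) (y : Int) :
    (t ++ [y]).getD t.length 0 = y := by
  simp [List.getD]

lemma getD_set_self (t : List Int) (i : Nat) (y : Int) (h : i < t.length) :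
    (t.set i y).getD i 0 = y := by
  simp [List.getD, List.getElem?_set_self, h]

lemma getD_set_ne (t : List Int) (i k : Nat) (y : Int) (h : i ≠ k) :
    (t.set i y).getD k 0 = t.getD k 0 := by
  simp [List.getD, List.getElem?_set_ne h]

-- the invariant is preserved by one element step
lemma inv_step (t : List Int) (ps : List (Int × Int)) (x : Int) (h : LisInv t ps) :
    LisInv (solStep t x) (altStep ps x) := by
  have hbe := best_eq t ps x h
  obtain ⟨hs, hB1, hB2, hB3⟩ := h
  set i := bisectRight t x with hidef
  have hic : i = t.countP (fun a => decide (a ≤ x)) := hidef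
  have hil : i ≤ t.length := bisectRight_le_length t x
  have hiff := countP_sorted_iff t x hs
  have hmem_new : (x, bestBelow ps x + 1) ∈ altStep ps x := by
    simp [altStep]
  have hmem_old : ∀ p ∈ ps, p ∈ altStep ps x := by
    intro p hp; simp [altStep, hp]
  have hsplit : ∀ p ∈ altStep ps x, p ∈ ps ∨ p = (x, ((i:Nat):Int) + 1) := by
    intro p hp
    rcases List.mem_append.mp hp with h' | h'
    · exact Or.inl h'
    · right; rw [← hbe]; simpa using h'
  by_cases hcase : t.length = i
  · -- append case
    have hstep : solStep t x = t ++ [x] := by simp [solStep, ← hidef, hcase]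
    have hall : ∀ k : Nat, k < t.length → t.getD k 0 ≤ x := by
      intro k hk; exact (hiff k hk).mpr (by omega)
    rw [hstep]
    have hlen : (t ++ [x]).length = t.length + 1 := by simp
    refine ⟨?_, ?_, ?_, ?_⟩
    · intro j k hjk hk
      rw [hlen] at hk
      by_cases hkt : k < t.length
      · rw [getD_append_lt t x j (by omega), getD_append_lt t x k hkt]
        exact hs j k hjk hkt
      · have hkeq : k = t.length := by omega
        subst hkeq
        rw [getD_append_self]
        by_cases hjt : j < t.length
        · rw [getD_append_lt t x j hjt]; exact hall j hjt
        · have : j = t.length := by omega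
          subst this; rw [getD_append_self]
    · intro p hp
      rcases hsplit p hp with hp' | rfl
      · have := hB1 p hp'; rw [hlen]; push_cast; omega
      · rw [hlen]; push_cast; simp; omega
    · intro k hk
      rw [hlen] at hk
      by_cases hkt : k < t.length
      · obtain ⟨p, hp, h1, h2⟩ := hB2 k hkt
        exact ⟨p, hmem_old p hp, h1, by rw [getD_append_lt t x k hkt]; exact h2⟩
      · have hkeq : k = t.length := by omega
        subst hkeq
        refine ⟨(x, bestBelow ps x + 1), hmem_new, ?_, ?_⟩
        · rw [hbe, ← hcase]
        · rw [getD_append_self]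
    · intro p hp k hk hkd
      rw [hlen] at hk
      rcases hsplit p hp with hp' | rfl
      · have hd := (hB1 p hp').2
        have hkt : k < t.length := by
          by_contra h'
          have : k = t.length := by omega
          omega
        rw [getD_append_lt t x k hkt]
        exact hB3 p hp' k hkt hkd
      · by_cases hkt : k < t.length
        · rw [getD_append_lt t x k hkt]; exact hall k hkt
        · have : k = t.length := by omega
          subst this; rw [getD_append_self]
  · -- set case
    have hilen : i < t.length := by omega
    have hstep : solStep t x = t.set i x := by simp [solStep, ← hidef, hcase]
    have hgt : ∀ k : Nat, i ≤ k → k < t.length → x < t.getD k 0 := by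
      intro k hik hk
      by_contra h'
      push_neg at h'
      have := (hiff k hk).mp h'
      omega
    have hle : ∀ k : Nat, k < i → t.getD k 0 ≤ x := by
      intro k hk; exact (hiff k (by omega)).mpr hk
    -- any old pair with dp ≥ i+1 has value > x
    have hbig : ∀ p ∈ ps, ((i:Nat):Int) + 1 ≤ p.2 → x < p.1 := by
      intro p hp hd
      by_contra h'
      push_neg at h'
      obtain ⟨_, hub, _⟩ := bestBelow_go_spec x ps 0
      have := hub p hp h'
      rw [bestBelow] at hbe
      omega
    rw [hstep]
    have hlen : (t.set i x).length = t.length := by simp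
    refine ⟨?_, ?_, ?_, ?_⟩
    · intro j k hjk hk
      rw [hlen] at hk
      by_cases hji : j = i <;> by_cases hki : k = i
      · subst hji hki; simp
      · subst hji
        rw [getD_set_self t i x hilen, getD_set_ne t i k x (Ne.symm hki)]
        have : i < k := by omega
        exact le_of_lt (hgt k (by omega) hk)
      · subst hki
        rw [getD_set_self t i x hilen, getD_set_ne t i j x (by omega)]
        exact hle j (by omega)
      · rw [getD_set_ne t i j x (by omega), getD_set_ne t i k x (by omega)]
        exact hs j k hjk hk
    · intro p hp
      rcases hsplit p hp with hp' | rfl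
      · have := hB1 p hp'; rw [hlen]; omega
      · rw [hlen]; simp; push_cast; omega
    · intro k hk
      rw [hlen] at hk
      by_cases hki : k = i
      · refine ⟨(x, bestBelow ps x + 1), hmem_new, by rw [hbe, hki], ?_⟩
        rw [hki, getD_set_self t i x hilen]
      · obtain ⟨p, hp, h1, h2⟩ := hB2 k hk
        exact ⟨p, hmem_old p hp, h1, by rw [getD_set_ne t i k x (by omega)]; exact h2⟩
    · intro p hp k hk hkd
      rw [hlen] at hk
      rcases hsplit p hp with hp' | rfl
      · by_cases hki : k = i
        · rw [hki, getD_set_self t i x hilen]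
          exact le_of_lt (hbig p hp' (hki ▸ hkd))
        · rw [getD_set_ne t i k x (by omega)]
          exact hB3 p hp' k hk hkd
      · simp only at hkd
        have hki : k ≤ i := by omega
        by_cases hki' : k = i
        · rw [hki', getD_set_self t i x hilen]
        · rw [getD_set_ne t i k x (by omega)]
          exact hle k (by omega)

lemma inv_fold (nums : List Int) (t : List Int) (ps : List (Int × Int)) (h : LisInv t ps) :
    LisInv (nums.foldl solStep t) (nums.foldl altStep ps) := by
  induction nums generalizing t ps with
  | nil => simpa
  | cons x nums ih => exact ih _ _ (inv_step t ps x h)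

lemma inv_nil : LisInv [] [] := by
  refine ⟨?_, ?_, ?_, ?_⟩ <;> simp [SortedLe]

lemma bestAll_eq_length (t : List Int) (ps : List (Int × Int)) (h : LisInv t ps) :
    bestAll ps = (t.length : Int) := by
  obtain ⟨hs, hB1, hB2, hB3⟩ := h
  obtain ⟨h0, hub, hex⟩ := bestAll_go_spec ps 0
  apply le_antisymm
  · rcases hex with he | ⟨p, hp, hpe⟩
    · rw [bestAll, he]; positivity
    · rw [bestAll, ← hpe]; exact (hB1 p hp).2
  · rcases Nat.eq_zero_or_pos t.length with h0' | hpos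
    · rw [h0']; exact_mod_cast h0
    · obtain ⟨p, hp, hpd, _⟩ := hB2 (t.length - 1) (by omega)
      have := hub p hp
      rw [bestAll]
      have hc : ((t.length - 1 : Nat) : Int) + 1 = (t.length : Int) := by omega
      omega

-- ===== VERDICT (by name: the statement is the Claim_ definition above) =====
theorem solution_spec : Claim_equal_solution := by
  intro N nums _
  unfold Spec_solution solution solution_alt
  have h := inv_fold nums [] [] inv_nil
  rw [bestAll_eq_length _ _ h]
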